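-- pv_equiv track=rewrite | github.com/FSZ1X2/CSI5180SimpleParaphraseClassifier | TestAlgo.py | FillPOS
-- ===== SOURCE A (Python) =====
-- def FillPOS(targetPos_list, pos_list, word_list):
--     OutputList = [""]*len(targetPos_list)
--     for i in range(0, len(word_list)):
--         for j in range(0,len(targetPos_list)):
--             if pos_list[i] == targetPos_list[j]:
--                 if OutputList[j] == "":
--                     OutputList[j] = word_list[i]
--                     word_list[i] = ""
--                 else:
--                     continue
--     return OutputList
-- ===== SOURCE B (Python) =====
-- def FillPOS(targetPos_list, pos_list, word_list):
--     # Group target slot indices by POS once, then serve each word the next free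
--     # slot of its POS in O(1): O(W+T) instead of A's O(W*T).
--     # Like A, consumed words are blanked out of word_list in place.
--     slots = {}
--     for j in range(len(targetPos_list)):
--         slots.setdefault(targetPos_list[j], []).append(j)
--     out = [""] * len(targetPos_list)
--     nxt = {}
--     for i in range(len(word_list)):
--         w = word_list[i]
--         p = pos_list[i]
--         q = slots.get(p, ())
--         k = nxt.get(p, 0)
--         if w != "" and k < len(q):
--             out[q[k]] = w
--             nxt[p] = k + 1
--             word_list[i] = ""
--     return out
-- ===== Notes on version B (the rewrite author's own statement) =====
-- stated objective: faster
-- what changed: Replaced the per-word scan over all target slots by a one-time grouping of slot indices by POS with per-POS cursor dicts, so each word is placed in O(1).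
-- outside the precondition, e.g. on FillPOS([], ['a'], ['x', 'y']): A returns [], B raises IndexError
import Mathlib
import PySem

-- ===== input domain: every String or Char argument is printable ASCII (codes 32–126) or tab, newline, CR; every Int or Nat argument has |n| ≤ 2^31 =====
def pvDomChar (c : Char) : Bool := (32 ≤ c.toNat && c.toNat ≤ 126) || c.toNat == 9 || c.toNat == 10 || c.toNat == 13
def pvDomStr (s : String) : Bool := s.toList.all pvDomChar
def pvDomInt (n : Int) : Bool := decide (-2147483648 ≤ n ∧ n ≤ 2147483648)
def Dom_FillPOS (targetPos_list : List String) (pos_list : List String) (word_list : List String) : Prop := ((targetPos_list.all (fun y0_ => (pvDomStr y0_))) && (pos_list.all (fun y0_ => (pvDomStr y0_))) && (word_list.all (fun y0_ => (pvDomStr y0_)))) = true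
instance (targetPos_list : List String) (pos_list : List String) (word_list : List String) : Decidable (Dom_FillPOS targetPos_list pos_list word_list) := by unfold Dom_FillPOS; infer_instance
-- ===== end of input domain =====

-- B replaces A's per-word scan of all target slots by per-POS queues of slot
-- indices with cursors (asymptotically faster); both programs also blank
-- consumed words out of word_list in place — the equivalence proved here is
-- about the RETURN value only (B performs the same mutation).


-- ===== PORT A =====
-- inner loop 'for j in range(0, len(targetPos_list))'; state = (OutputList, word_list)
def aInner (targetPos_list pos_list : List String) (i : Nat)
    (st : List String × List String) (j : Nat) : List String × List String :=
  if pos_list.getD i "" = targetPos_list.getD j "" then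
    if st.1.getD j "" = "" then
      (st.1.set j (st.2.getD i ""), st.2.set i "")
    else st
  else st

-- outer loop body: one word index i
def aOuter (targetPos_list pos_list : List String)
    (st : List String × List String) (i : Nat) : List String × List String :=
  (List.range targetPos_list.length).foldl (aInner targetPos_list pos_list i) st

def FillPOS (targetPos_list : List String) (pos_list : List String) (word_list : List String) : List String :=
  ((List.range word_list.length).foldl (aOuter targetPos_list pos_list)
    (List.replicate targetPos_list.length "", word_list)).1

-- ===== PORT B =====
-- slots.setdefault(targetPos_list[j], []).append(j)
def bBuild (targetPos_list : List String)
    (d : PySem.Dict String (List Nat)) (j : Nat) : PySem.Dict String (List Nat) :=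
  d.insert (targetPos_list.getD j "") (d.getD (targetPos_list.getD j "") [] ++ [j])

def bSlots (targetPos_list : List String) : PySem.Dict String (List Nat) :=
  (List.range targetPos_list.length).foldl (bBuild targetPos_list) (PySem.Dict.mk [])

-- main loop body: state = (out, nxt)
def bStep (pos_list word_list : List String) (slots : PySem.Dict String (List Nat))
    (st : List String × PySem.Dict String Nat) (i : Nat) : List String × PySem.Dict String Nat :=
  let w := word_list.getD i ""
  let p := pos_list.getD i ""
  let q := slots.getD p []
  let k := st.2.getD p 0
  if w ≠ "" ∧ k < q.length then
    (st.1.set (q.getD k 0) w, st.2.insert p (k + 1))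
  else st

def FillPOS_alt (targetPos_list : List String) (pos_list : List String) (word_list : List String) : List String :=
  ((List.range word_list.length).foldl
    (bStep pos_list word_list (bSlots targetPos_list))
    (List.replicate targetPos_list.length "", PySem.Dict.mk [])).1

-- ===== PRECONDITION & SPEC =====
-- Pre_ excludes word_list longer than pos_list: there A raises IndexError reading
-- pos_list[i] (except when targetPos_list is empty, where A's inner loop never runs and
-- it returns [] without ever touching pos_list — B naturally raises IndexError there).
def Pre_FillPOS (_targetPos_list : List String) (pos_list : List String) (word_list : List String) : Prop :=
  word_list.length ≤ pos_list.length
instance (targetPos_list : List String) (pos_list : List String) (word_list : List String) : Decidable (Pre_FillPOS targetPos_list pos_list word_list) := by unfold Pre_FillPOS; infer_instance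

def pvWitness_FillPOS : List String × List String × List String :=
  (["N", "V", "N"], ["N", "N"], ["dog", "cat"])

def Spec_FillPOS (targetPos_list : List String) (pos_list : List String) (word_list : List String) (out : List String) : Prop := out = FillPOS_alt targetPos_list pos_list word_list
instance (targetPos_list : List String) (pos_list : List String) (word_list : List String) (out : List String) : Decidable (Spec_FillPOS targetPos_list pos_list word_list out) := by unfold Spec_FillPOS; infer_instance

-- ===== CLAIM (what is proved, stated in full; the proofs are below) =====
def Claim_equal_FillPOS : Prop := ∀ (targetPos_list : List String) (pos_list : List String) (word_list : List String), Dom_FillPOS targetPos_list pos_list word_list → Pre_FillPOS targetPos_list pos_list word_list → Spec_FillPOS targetPos_list pos_list word_list (FillPOS targetPos_list pos_list word_list)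

-- ===== LEMMAS AND PROOFS =====

-- the indices of still-empty slots whose target POS is p, in increasing order
def emptyIdx (targetPos_list : List String) (p : String) (out : List String) : List Nat :=
  (List.range targetPos_list.length).filter
    (fun j => decide (targetPos_list.getD j "" = p ∧ out.getD j "" = ""))

-- all slot indices whose target POS is p
def slotsFor (targetPos_list : List String) (p : String) : List Nat :=
  (List.range targetPos_list.length).filter (fun j => decide (targetPos_list.getD j "" = p))

theorem set_default_self (l : List String) (j : Nat) (h : l.getD j "" = "") :
    l.set j "" = l := by
  induction l generalizing j with
  | nil => rfl
  | cons a t ih =>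
    cases j with
    | zero => simp_all [List.getD]
    | succ m => simp only [List.set]; rw [ih m (by simpa [List.getD] using h)]

theorem inner_empty (tp pos : List String) (i : Nat) (js : List Nat)
    (out ws : List String) (h : ws.getD i "" = "") :
    js.foldl (aInner tp pos i) (out, ws) = (out, ws) := by
  induction js generalizing out ws with
  | nil => rfl
  | cons j t ih =>
    simp only [List.foldl]
    have : aInner tp pos i (out, ws) j = (out, ws) := by
      unfold aInner
      split_ifs with h1 h2
      · simp only [h, set_default_self out j h2, set_default_self ws i h]
      · rfl
      · rfl
    rw [this, ih out ws h]

theorem inner_assign (tp pos : List String) (i : Nat) (js : List Nat)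
    (out ws : List String) (w : String) (hw : ws.getD i "" = w) (hne : w ≠ "") :
    js.foldl (aInner tp pos i) (out, ws) =
      match js.filter (fun j => decide (tp.getD j "" = pos.getD i "" ∧ out.getD j "" = "")) with
      | [] => (out, ws)
      | j :: _ => (out.set j w, ws.set i "") := by
  have hilen : i < ws.length := by
    by_contra hc
    rw [List.getD_eq_default _ _ (by omega)] at hw
    exact hne hw.symm
  induction js generalizing out with
  | nil => rfl
  | cons j t ih =>
    rw [List.foldl_cons]
    by_cases h1 : pos.getD i "" = tp.getD j ""
    · by_cases h2 : out.getD j "" = ""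
      · rw [show aInner tp pos i (out, ws) j = (out.set j w, ws.set i "") from by
          unfold aInner; rw [if_pos h1, if_pos h2, hw]]
        rw [inner_empty tp pos i t _ _ (by
          rw [List.getD_eq_getElem?_getD, List.getElem?_set_self hilen]; rfl)]
        have hcond : (fun j => decide (tp.getD j "" = pos.getD i "" ∧ out.getD j "" = "")) j = true :=
          decide_eq_true ⟨h1.symm, h2⟩
        simp only [List.filter_cons, hcond, if_true]
      · rw [show aInner tp pos i (out, ws) j = (out, ws) from by
          unfold aInner; rw [if_pos h1, if_neg h2]]
        have hcond : (fun j => decide (tp.getD j "" = pos.getD i "" ∧ out.getD j "" = "")) j = false :=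
          decide_eq_false (fun h => h2 h.2)
        simp only [List.filter_cons, hcond, Bool.false_eq_true, if_false]
        exact ih out
    · rw [show aInner tp pos i (out, ws) j = (out, ws) from by
        unfold aInner; rw [if_neg h1]]
      have hcond : (fun j => decide (tp.getD j "" = pos.getD i "" ∧ out.getD j "" = "")) j = false :=
        decide_eq_false (fun h => h1 h.1.symm)
      simp only [List.filter_cons, hcond, Bool.false_eq_true, if_false]
      exact ih out

theorem build_getD (tp : List String) (js : List Nat)
    (d : PySem.Dict String (List Nat)) (p : String) :
    (js.foldl (bBuild tp) d).getD p [] =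
      d.getD p [] ++ js.filter (fun j => decide (tp.getD j "" = p)) := by
  induction js generalizing d with
  | nil => simp
  | cons j t ih =>
    rw [List.foldl_cons, ih]
    by_cases h : tp.getD j "" = p
    · have hcond : decide (tp.getD j "" = p) = true := decide_eq_true h
      simp only [List.filter_cons, hcond, if_true]
      rw [show (bBuild tp d j).getD p [] = d.getD p [] ++ [j] from by
        unfold bBuild; rw [PySem.Dict.getD_insert, if_pos h.symm, h]]
      simp
    · have hcond : decide (tp.getD j "" = p) = false := decide_eq_false h
      simp only [List.filter_cons, hcond, Bool.false_eq_true, if_false]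
      rw [show (bBuild tp d j).getD p [] = d.getD p [] from by
        unfold bBuild; rw [PySem.Dict.getD_insert, if_neg (fun hc => h hc.symm)]]

theorem slots_getD (tp : List String) (p : String) :
    (bSlots tp).getD p [] = slotsFor tp p := by
  unfold bSlots slotsFor
  rw [build_getD]
  simp [pysem]

-- removing the slot we just filled from every emptiness list
theorem emptyIdx_set (tp : List String) (p : String) (out : List String)
    (j : Nat) (w : String) (hj : j < out.length) (hw : w ≠ "") :
    emptyIdx tp p (out.set j w) = (emptyIdx tp p out).filter (fun j' => decide (j' ≠ j)) := by
  unfold emptyIdx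
  rw [List.filter_filter]
  apply List.filter_congr
  intro x _
  by_cases hx : x = j
  · subst hx
    simp [List.getD_eq_getElem?_getD, List.getElem?_set_self hj, hw]
  · simp [List.getD_eq_getElem?_getD, List.getElem?_set_ne (by omega : j ≠ x), hx]

theorem emptyIdx_replicate (tp : List String) (p : String) :
    emptyIdx tp p (List.replicate tp.length "") = slotsFor tp p := by
  unfold emptyIdx slotsFor
  apply List.filter_congr
  intro x hx
  have h0 : (List.replicate tp.length "").getD x "" = "" := by
    rw [List.getD_eq_getElem?_getD, List.getElem?_replicate]
    split <;> rfl
  simp only [h0, and_true]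

theorem mem_slotsFor (tp : List String) (p : String) (x : Nat) (hx : x ∈ slotsFor tp p) :
    tp.getD x "" = p ∧ x < tp.length := by
  unfold slotsFor at hx
  simp [List.mem_filter, List.mem_range] at hx
  exact ⟨hx.2, hx.1⟩

theorem nodup_slotsFor (tp : List String) (p : String) : (slotsFor tp p).Nodup :=
  (List.nodup_range).filter _

-- the combined invariant carried through both main loops
theorem main_inv (tp pos words : List String) (n : Nat) :
    ((List.range n).foldl (aOuter tp pos) (List.replicate tp.length "", words)).1 =
      ((List.range n).foldl (bStep pos words (bSlots tp)) (List.replicate tp.length "", PySem.Dict.mk [])).1 ∧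
    (∀ m, n ≤ m →
      ((List.range n).foldl (aOuter tp pos) (List.replicate tp.length "", words)).2.getD m "" = words.getD m "") ∧
    ((List.range n).foldl (bStep pos words (bSlots tp)) (List.replicate tp.length "", PySem.Dict.mk [])).1.length = tp.length ∧
    (∀ p, emptyIdx tp p ((List.range n).foldl (bStep pos words (bSlots tp)) (List.replicate tp.length "", PySem.Dict.mk [])).1 =
      (slotsFor tp p).drop
        (((List.range n).foldl (bStep pos words (bSlots tp)) (List.replicate tp.length "", PySem.Dict.mk [])).2.getD p 0)) := by
  induction n with
  | zero =>
    refine ⟨rfl, fun m _ => rfl, by simp, fun p => ?_⟩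
    simp only [List.range_zero, List.foldl_nil]
    rw [emptyIdx_replicate]
    have : (PySem.Dict.mk ([] : List (String × Nat))).getD p 0 = 0 := by simp [pysem]
    rw [this, List.drop_zero]
  | succ n ih =>
    obtain ⟨hout, hws, hlen, hinv⟩ := ih
    set sA := (List.range n).foldl (aOuter tp pos) (List.replicate tp.length "", words) with hsA
    set sB := (List.range n).foldl (bStep pos words (bSlots tp))
      (List.replicate tp.length "", PySem.Dict.mk []) with hsB
    rw [List.range_succ]
    simp only [List.foldl_append, List.foldl_cons, List.foldl_nil, ← hsA, ← hsB]
    set w := words.getD n "" with hwdef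
    have hwn : sA.2.getD n "" = w := hws n (le_refl n)
    set p := pos.getD n "" with hpdef
    set k := sB.2.getD p 0 with hkdef
    set q := (bSlots tp).getD p [] with hqdef
    have hq : q = slotsFor tp p := slots_getD tp p
    have hAeq : aOuter tp pos sA n = (List.range tp.length).foldl (aInner tp pos n) (sA.1, sA.2) := rfl
    by_cases hw : w = ""
    · -- empty word: both sides leave their state unchanged
      have hA : aOuter tp pos sA n = sA := by
        rw [hAeq, inner_empty tp pos n _ sA.1 sA.2 (by rw [hwn, hw])]
      have hB : bStep pos words (bSlots tp) sB n = sB := by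
        unfold bStep
        rw [if_neg (by rw [← hwdef, ← hpdef, ← hqdef, ← hkdef]; exact fun hc => hc.1 hw)]
      rw [hA, hB]
      exact ⟨hout, fun m hm => hws m (by omega), hlen, hinv⟩
    · -- nonempty word
      have hfilt : (List.range tp.length).filter
          (fun j => decide (tp.getD j "" = pos.getD n "" ∧ sA.1.getD j "" = "")) =
          (slotsFor tp p).drop k := by
        have : (List.range tp.length).filter
            (fun j => decide (tp.getD j "" = pos.getD n "" ∧ sA.1.getD j "" = "")) =
            emptyIdx tp p sA.1 := rfl
        rw [this, hout]; exact hinv p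
      have hA0 := inner_assign tp pos n (List.range tp.length) sA.1 sA.2 w hwn hw
      cases hdrop : (slotsFor tp p).drop k with
      | nil =>
        have hA : aOuter tp pos sA n = sA := by
          rw [hAeq, hA0, hfilt, hdrop]
        have hklen : (slotsFor tp p).length ≤ k := List.drop_eq_nil_iff.mp hdrop
        have hB : bStep pos words (bSlots tp) sB n = sB := by
          unfold bStep
          rw [if_neg (by
            rw [← hwdef, ← hpdef, ← hqdef, ← hkdef]
            intro hc
            have h2 := hc.2
            rw [hq] at h2
            omega)]
        rw [hA, hB]
        exact ⟨hout, fun m hm => hws m (by omega), hlen, hinv⟩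
      | cons j rest =>
        have hklt : k < (slotsFor tp p).length := by
          by_contra hc
          rw [List.drop_eq_nil_of_le (by omega)] at hdrop
          exact List.cons_ne_nil _ _ hdrop.symm
        have hjmem : j ∈ slotsFor tp p := by
          have hmem : j ∈ (slotsFor tp p).drop k := by
            rw [hdrop]; exact List.mem_cons_self
          exact List.drop_subset _ _ hmem
        obtain ⟨hjp, hjlt⟩ := mem_slotsFor tp p j hjmem
        have hqk : q.getD k 0 = j := by
          rw [hq, List.getD_eq_getElem?_getD]
          have h0 : ((slotsFor tp p).drop k)[0]? = some j := by rw [hdrop]; rfl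
          rw [List.getElem?_drop] at h0
          simp only [Nat.add_zero] at h0
          rw [h0]
          rfl
        have hA : aOuter tp pos sA n = (sA.1.set j w, sA.2.set n "") := by
          rw [hAeq, hA0, hfilt, hdrop]
        have hB : bStep pos words (bSlots tp) sB n = (sB.1.set j w, sB.2.insert p (k + 1)) := by
          simp only [bStep]
          rw [← hwdef, ← hpdef, ← hqdef, ← hkdef]
          rw [if_pos ⟨hw, by rw [hq]; exact hklt⟩, hqk]
        rw [hA, hB]
        refine ⟨by rw [hout], fun m hm => ?_, by rw [List.length_set, hlen], fun p'' => ?_⟩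
        · rw [List.getD_eq_getElem?_getD, List.getElem?_set_ne (by omega : n ≠ m),
            ← List.getD_eq_getElem?_getD]
          exact hws m (by omega)
        · have hjlen' : j < sB.1.length := by rw [hlen]; exact hjlt
          rw [emptyIdx_set tp p'' sB.1 j w hjlen' hw]
          by_cases hp : p'' = p
          · subst hp
            rw [hinv p, ← hkdef, hdrop]
            have hnd : (j :: rest).Nodup := by
              rw [← hdrop]
              exact ((slotsFor tp p).drop_sublist k).nodup (nodup_slotsFor tp p)
            have hfil : (j :: rest).filter (fun j' => decide (j' ≠ j)) = rest := by
              rw [List.filter_cons]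
              simp only [ne_eq, not_true_eq_false, decide_false, Bool.false_eq_true, if_false]
              exact List.filter_eq_self.mpr
                (fun x hx => decide_eq_true (fun he => (List.nodup_cons.mp hnd).1 (he ▸ hx)))
            rw [hfil]
            have hgd : (sB.2.insert p (k + 1)).getD p 0 = k + 1 := by
              rw [PySem.Dict.getD_insert, if_pos rfl]
            rw [hgd]
            have hdd : (slotsFor tp p).drop (k + 1) = ((slotsFor tp p).drop k).drop 1 := by
              rw [List.drop_drop]
            rw [hdd, hdrop, List.drop_one, List.tail_cons]
          · have hgd : (sB.2.insert p (k + 1)).getD p'' 0 = sB.2.getD p'' 0 := by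
              rw [PySem.Dict.getD_insert, if_neg hp]
            rw [hinv p'', hgd]
            apply List.filter_eq_self.mpr
            intro x hx
            have hxm : x ∈ slotsFor tp p'' := List.drop_subset _ _ hx
            exact decide_eq_true (fun he => hp (by
              rw [← (mem_slotsFor tp p'' x hxm).1, he, hjp]))

theorem FillPOS_spec : Claim_equal_FillPOS := by
  intro tp pos words _ _
  unfold Spec_FillPOS FillPOS FillPOS_alt
  exact (main_inv tp pos words words.length).1
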